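-- pv_equiv track=rewrite | github.com/Omega800X/tps-ia | tp1_ia/punto3.py | obtener_mejores_tres_estudiantes
-- ===== SOURCE A (Python) =====
-- def obtener_mejores_tres_estudiantes(lista_estudiantes):
--
--     # Lista ordenada por promedios
--     lista_ordenada = sorted(
--         lista_estudiantes,
--         key= lambda estudiante : estudiante[2],
--         reverse= True
--     )
--
--     lista_ordenada = lista_ordenada[:3]
--     lista_ordenada = [
--         (estudiante[0], estudiante[2])
--         for estudiante in lista_ordenada
--     ]
--
--     return lista_ordenada
-- ===== SOURCE B (Python) =====
-- def _insertar(nuevo, mejores):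
--     """Insert (name, avg) before the first entry with strictly smaller avg
--     (ties stay in front, preserving original order)."""
--     if not mejores or nuevo[1] > mejores[0][1]:
--         return [nuevo] + mejores
--     return [mejores[0]] + _insertar(nuevo, mejores[1:])
--
--
-- def obtener_mejores_tres_estudiantes(lista_estudiantes):
--     mejores = []
--     for estudiante in lista_estudiantes:
--         mejores = _insertar((estudiante[0], estudiante[2]), mejores)[:3]
--     return mejores
-- ===== Notes on version B (the rewrite author's own statement) =====
-- stated objective: alternative
-- what changed: Replaces the full stable reverse sort (then slice and project) by a single pass that maintains a bounded list of at most 3 projected (name, average) pairs via strict-greater insertion, which preserves tie order.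
import Mathlib
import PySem

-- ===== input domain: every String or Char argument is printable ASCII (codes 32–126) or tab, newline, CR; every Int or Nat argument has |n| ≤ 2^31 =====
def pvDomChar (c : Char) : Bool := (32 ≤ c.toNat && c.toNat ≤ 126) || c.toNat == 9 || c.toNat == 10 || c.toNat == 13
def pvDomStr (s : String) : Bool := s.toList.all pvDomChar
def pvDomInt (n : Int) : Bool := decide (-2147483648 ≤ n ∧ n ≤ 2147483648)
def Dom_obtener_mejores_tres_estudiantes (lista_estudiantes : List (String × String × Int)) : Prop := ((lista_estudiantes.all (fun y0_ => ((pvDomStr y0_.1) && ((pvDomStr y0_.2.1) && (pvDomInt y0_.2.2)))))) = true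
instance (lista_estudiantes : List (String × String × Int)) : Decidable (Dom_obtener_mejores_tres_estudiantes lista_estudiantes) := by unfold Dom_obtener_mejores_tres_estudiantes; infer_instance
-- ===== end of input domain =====

-- ===== PORT A =====
-- B replaces A's full stable reverse sort by one bounded-insertion pass over the list (alternative decomposition, same values).
def obtener_mejores_tres_estudiantes (lista_estudiantes : List (String × String × Int)) : List (String × Int) :=
  let lista_ordenada := PySem.List.sorted lista_estudiantes (fun estudiante => estudiante.2.2) true
  let lista_ordenada := PySem.List.slice lista_ordenada none (some 3)
  lista_ordenada.map (fun estudiante => (estudiante.1, estudiante.2.2))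

-- ===== PORT B =====
-- insert (name, avg) before the first entry with strictly smaller avg (ties stay in front)
def pvInsertar (nuevo : String × Int) : List (String × Int) → List (String × Int)
  | [] => [nuevo]
  | p :: ps => if nuevo.2 > p.2 then nuevo :: p :: ps else p :: pvInsertar nuevo ps

def obtener_mejores_tres_estudiantes_alt (lista_estudiantes : List (String × String × Int)) : List (String × Int) :=
  lista_estudiantes.foldl
    (fun mejores estudiante => (pvInsertar (estudiante.1, estudiante.2.2) mejores).take 3) []

-- ===== PRECONDITION & SPEC =====
def Spec_obtener_mejores_tres_estudiantes (lista_estudiantes : List (String × String × Int)) (out : List (String × Int)) : Prop := out = obtener_mejores_tres_estudiantes_alt lista_estudiantes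
instance (lista_estudiantes : List (String × String × Int)) (out : List (String × Int)) : Decidable (Spec_obtener_mejores_tres_estudiantes lista_estudiantes out) := by unfold Spec_obtener_mejores_tres_estudiantes; infer_instance

-- ===== CLAIM =====
def Claim_equal_obtener_mejores_tres_estudiantes : Prop := ∀ (lista_estudiantes : List (String × String × Int)), Dom_obtener_mejores_tres_estudiantes lista_estudiantes → Spec_obtener_mejores_tres_estudiantes lista_estudiantes (obtener_mejores_tres_estudiantes lista_estudiantes)

-- ===== LEMMAS AND PROOFS =====

-- B's hand-written insertion is insertBy with the strict reverse-key predicate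
theorem pvInsertar_eq_insertBy (nuevo : String × Int) (l : List (String × Int)) :
    pvInsertar nuevo l = PySem.List.insertBy (fun a b => decide (b.2 < a.2)) nuevo l := by
  induction l with
  | nil => rfl
  | cons p ps ih => simp [pvInsertar, PySem.List.insertBy, ih]

-- projection commutes with insertion (the predicates only look at the average)
theorem map_proj_insertBy (x : String × String × Int) (l : List (String × String × Int)) :
    (PySem.List.insertBy (fun a b => decide (b.2.2 < a.2.2)) x l).map (fun e => (e.1, e.2.2)) =
      PySem.List.insertBy (fun a b => decide (b.2 < a.2)) (x.1, x.2.2)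
        (l.map (fun e => (e.1, e.2.2))) := by
  induction l with
  | nil => rfl
  | cons y ys ih =>
    simp only [PySem.List.insertBy, List.map_cons]
    by_cases h : y.2.2 < x.2.2 <;> simp [h, ih]

-- inserting into a truncated list and truncating again = truncating the full insertion
theorem take_insertBy_take {α : Type} (before : α → α → Bool) (x : α) (l : List α) (n : Nat) :
    (PySem.List.insertBy before x (l.take n)).take n = (PySem.List.insertBy before x l).take n := by
  induction l generalizing n with
  | nil => simp
  | cons y ys ih =>
    cases n with
    | zero => simp
    | succ m =>
      simp only [List.take_succ_cons, PySem.List.insertBy]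
      by_cases h : before x y = true
      · simp only [h, if_pos rfl]
        have : (y :: ys.take m).take m = (y :: ys).take m := by
          cases m with
          | zero => simp
          | succ k => simp [List.take_take]
        simp [this]
      · simp [h, ih]

-- fold invariant: the bounded projected pass tracks (take 3 ∘ map proj) of the full insertion fold
theorem fold_invariant (xs : List (String × String × Int)) (full : List (String × String × Int)) :
    ((xs.foldl (fun acc x => PySem.List.insertBy (fun a b => decide (b.2.2 < a.2.2)) x acc) full).take 3).map
        (fun e => (e.1, e.2.2)) =
      xs.foldl (fun mejores e => (pvInsertar (e.1, e.2.2) mejores).take 3)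
        ((full.take 3).map (fun e => (e.1, e.2.2))) := by
  induction xs generalizing full with
  | nil => rfl
  | cons x xs ih =>
    simp only [List.foldl_cons]
    rw [ih]
    congr 1
    rw [pvInsertar_eq_insertBy, List.map_take, List.map_take, take_insertBy_take,
      ← map_proj_insertBy]

-- ===== VERDICT =====
theorem obtener_mejores_tres_estudiantes_spec : Claim_equal_obtener_mejores_tres_estudiantes := by
  intro l _
  show obtener_mejores_tres_estudiantes l = obtener_mejores_tres_estudiantes_alt l
  simp only [obtener_mejores_tres_estudiantes, obtener_mejores_tres_estudiantes_alt]
  rw [PySem.List.slice_to _ (by norm_num : (0:Int) ≤ 3), PySem.List.sorted_rev_eq_foldl_insertBy]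
  simpa using fold_invariant l []
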